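-- pv_equiv track=rewrite | github.com/Japneet001/Coding-World-Cup-2023 | DAY 27 (PAK vs BAN)/Bait and switch.py | baitAndSwitch
-- ===== SOURCE A (Python) =====
-- def baitAndSwitch(n: int, a: list, k: int, m: int) -> int:
--     li=[]
--     for i in range(n):
--         li.append(abs(a[i]-m))
--     li.sort()
--     li.reverse()
--     sum=0
--     for i in range(k):
--         sum+=li[i]
--     return sum
-- ===== SOURCE B (Python) =====
-- def baitAndSwitch(n: int, a: list, k: int, m: int) -> int:
--     # quickselect-style recursive top-k sum: partition around a pivot instead of sorting
--     def topk_sum(xs, k):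
--         if not xs:
--             return 0
--         if k <= 0:
--             return 0
--         p = xs[0]
--         hi = [x for x in xs if x > p]
--         if k <= len(hi):
--             return topk_sum(hi, k)
--         ne = len([x for x in xs if x == p])
--         if k <= len(hi) + ne:
--             return sum(hi) + (k - len(hi)) * p
--         lo = [x for x in xs if x < p]
--         return sum(hi) + ne * p + topk_sum(lo, k - len(hi) - ne)
--     return topk_sum([abs(a[i] - m) for i in range(n)], k)
-- ===== Notes on version B (the rewrite author's own statement) =====
-- stated objective: alternative
-- what changed: replaces sort+reverse+prefix-sum with a quickselect-style recursive partition (pivot = head; recurse only into the side containing the k-th largest), summing the k largest without sorting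
import Mathlib
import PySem

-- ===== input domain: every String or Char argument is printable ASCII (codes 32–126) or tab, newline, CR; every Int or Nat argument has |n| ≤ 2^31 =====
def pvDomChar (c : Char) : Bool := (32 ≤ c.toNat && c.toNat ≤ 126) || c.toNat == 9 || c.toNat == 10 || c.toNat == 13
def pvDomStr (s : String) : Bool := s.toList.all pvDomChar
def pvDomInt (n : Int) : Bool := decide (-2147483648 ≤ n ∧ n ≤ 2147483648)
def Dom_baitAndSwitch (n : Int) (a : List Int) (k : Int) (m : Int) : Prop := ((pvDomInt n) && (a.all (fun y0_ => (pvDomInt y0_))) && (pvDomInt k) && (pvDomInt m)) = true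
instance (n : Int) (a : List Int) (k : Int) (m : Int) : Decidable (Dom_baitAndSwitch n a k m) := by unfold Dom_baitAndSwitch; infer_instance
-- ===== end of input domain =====

-- B replaces A's sort+reverse+prefix-sum by a quickselect-style recursive partition: a different algorithm, same exact value.

-- ===== PORT A =====
def baitAndSwitch (n : Int) (a : List Int) (k : Int) (m : Int) : Int :=
  let li := (PySem.List.pyRange 0 n 1).foldl (fun li i => li ++ [|PySem.List.pyGetD a i 0 - m|]) []
  let li2 := PySem.List.sorted li (fun x => x) false
  let li3 := li2.reverse
  (PySem.List.pyRange 0 k 1).foldl (fun s i => s + PySem.List.pyGetD li3 i 0) 0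

-- ===== PORT B =====
-- quickselect-style top-k sum (Source B's topk_sum, step for step)
def pvTopkSum : List Int → Int → Int
  | [], _ => 0
  | p :: rest, k =>
    if k ≤ 0 then 0
    else
      let xs := p :: rest
      let hi := xs.filter (fun x => decide (p < x))
      if k ≤ (hi.length : Int) then pvTopkSum hi k
      else
        let ne := (xs.filter (fun x => decide (x = p))).length
        if k ≤ (hi.length : Int) + ne then hi.sum + (k - hi.length) * p
        else
          let lo := xs.filter (fun x => decide (x < p))
          hi.sum + (ne : Int) * p + pvTopkSum lo (k - hi.length - ne)
  termination_by xs _ => xs.length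
  decreasing_by
    · exact List.length_filter_lt_length_iff_exists.mpr ⟨p, by simp⟩
    · exact List.length_filter_lt_length_iff_exists.mpr ⟨p, by simp⟩

def baitAndSwitch_alt (n : Int) (a : List Int) (k : Int) (m : Int) : Int :=
  pvTopkSum ((PySem.List.pyRange 0 n 1).map (fun i => |PySem.List.pyGetD a i 0 - m|)) k

-- ===== PRECONDITION & SPEC =====
-- Pre_ is exactly where A returns: a[i] must exist for every i in range(n) (n ≤ len(a) unless the
-- loop is empty), and li[i] must exist for every i in range(k) (k ≤ max(n,0)); otherwise IndexError.
def Pre_baitAndSwitch (n : Int) (a : List Int) (k : Int) (m : Int) : Prop :=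
  (n ≤ (a.length : Int) ∨ n ≤ 0) ∧ k ≤ max n 0
instance (n : Int) (a : List Int) (k : Int) (m : Int) : Decidable (Pre_baitAndSwitch n a k m) := by
  unfold Pre_baitAndSwitch; infer_instance

def pvWitness_baitAndSwitch : Int × List Int × Int × Int := (3, [1, 5, 2], 2, 3)

def Spec_baitAndSwitch (n : Int) (a : List Int) (k : Int) (m : Int) (out : Int) : Prop := out = baitAndSwitch_alt n a k m
instance (n : Int) (a : List Int) (k : Int) (m : Int) (out : Int) : Decidable (Spec_baitAndSwitch n a k m out) := by unfold Spec_baitAndSwitch; infer_instance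

-- ===== CLAIM (what is proved, stated in full; the proofs are below) =====
def Claim_equal_baitAndSwitch : Prop := ∀ (n : Int) (a : List Int) (k : Int) (m : Int), Dom_baitAndSwitch n a k m → Pre_baitAndSwitch n a k m → Spec_baitAndSwitch n a k m (baitAndSwitch n a k m)

-- ===== LEMMAS AND PROOFS =====

-- sum of the first t elements via repeated indexing equals the sum of the prefix
lemma pvSumFirst_nat (xs : List Int) : ∀ (t : Nat), t ≤ xs.length →
    (PySem.List.pyRange 0 t 1).foldl (fun s i => s + PySem.List.pyGetD xs i 0) 0
      = (xs.take t).sum := by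
  intro t
  induction t with
  | zero => intro _; simp [PySem.List.pyRange_one_eq_nil]
  | succ t ih =>
    intro ht
    have h1 : ((t : Int) + 1) = ((t + 1 : Nat) : Int) := by push_cast; ring
    have : PySem.List.pyRange 0 ((t + 1 : Nat) : Int) 1
        = PySem.List.pyRange 0 (t : Int) 1 ++ [(t : Int)] := by
      rw [← h1, PySem.List.pyRange_one_succ_right (by positivity)]
    rw [this, List.foldl_append]
    simp only [List.foldl_cons, List.foldl_nil]
    rw [ih (by omega)]
    have hget : PySem.List.pyGetD xs (t : Int) 0 = xs[t] :=
      PySem.List.pyGetD_ofNat xs t 0 (by omega)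
    rw [hget, List.take_add_one, List.sum_append]
    simp [List.getElem?_eq_getElem (by omega : t < xs.length)]
    rfl

lemma pvSumFirst (xs : List Int) (k : Int) (hk : k ≤ (xs.length : Int)) :
    (PySem.List.pyRange 0 k 1).foldl (fun s i => s + PySem.List.pyGetD xs i 0) 0
      = (xs.take k.toNat).sum := by
  rcases (by omega : k ≤ 0 ∨ 0 < k) with h | h
  · rw [PySem.List.pyRange_one_eq_nil h]
    simp [Int.toNat_of_nonpos h]
  · have : k = (k.toNat : Int) := (Int.toNat_of_nonneg h.le).symm
    rw [this]
    exact pvSumFirst_nat xs k.toNat (by omega)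

-- the descending rearrangement used by A
def pvDesc (xs : List Int) : List Int := (PySem.List.sorted xs (fun x => x) false).reverse

lemma pvDesc_perm (xs : List Int) : (pvDesc xs).Perm xs := by
  unfold pvDesc
  exact (List.reverse_perm _).trans (PySem.List.sorted_perm xs _ _)

lemma pvDesc_pairwise (xs : List Int) : (pvDesc xs).Pairwise (fun a b => b ≤ a) := by
  unfold pvDesc
  rw [List.pairwise_reverse]
  exact PySem.List.sorted_pairwise xs (fun x => x)

lemma pvDesc_length (xs : List Int) : (pvDesc xs).length = xs.length := by
  unfold pvDesc
  simp [PySem.List.length_sorted]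

-- any nonincreasing rearrangement is THE nonincreasing rearrangement
lemma pvDesc_eq (xs ys : List Int) (hp : ys.Perm xs) (hs : ys.Pairwise (fun a b => b ≤ a)) :
    pvDesc xs = ys :=
  List.Perm.eq_of_pairwise (fun _ _ _ _ h h' => le_antisymm h' h)
    (pvDesc_pairwise xs) hs ((pvDesc_perm xs).trans hp.symm)

-- the three-way partition of xs around p, rearranged descendingly, is a descending perm of xs
lemma pvRep_eq (xs : List Int) (p : Int) :
    List.replicate (xs.filter (fun x => decide (x = p))).length p
      = xs.filter (fun x => decide (x = p)) := by
  symm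
  rw [List.eq_replicate_iff]
  refine ⟨rfl, ?_⟩
  intro b hb
  simpa using List.of_mem_filter hb

lemma pvPartition_perm (xs : List Int) (p : Int) :
    (pvDesc (xs.filter (fun x => decide (p < x)))
      ++ List.replicate (xs.filter (fun x => decide (x = p))).length p
      ++ pvDesc (xs.filter (fun x => decide (x < p)))).Perm xs := by
  rw [List.append_assoc, pvRep_eq]
  have h3 : ((xs.filter (fun x => !decide (p < x))).filter (fun x => decide (x = p))
        ++ (xs.filter (fun x => !decide (p < x))).filter (fun x => !decide (x = p))).Perm
        (xs.filter (fun x => !decide (p < x))) :=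
    List.filter_append_perm _ _
  have e1 : (xs.filter (fun x => !decide (p < x))).filter (fun x => decide (x = p))
      = xs.filter (fun x => decide (x = p)) := by
    rw [List.filter_filter]
    congr 1
    funext x
    by_cases h : x = p <;> simp [h]
  have e2 : (xs.filter (fun x => !decide (p < x))).filter (fun x => !decide (x = p))
      = xs.filter (fun x => decide (x < p)) := by
    rw [List.filter_filter]
    congr 1
    funext x
    by_cases h : x = p
    · simp [h]
    · by_cases h2 : x < p <;> simp [h, h2] <;> omega
  rw [e1, e2] at h3
  refine (List.Perm.append (pvDesc_perm _) (List.Perm.refl _)).trans ?_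
  refine List.Perm.trans (List.Perm.append (List.Perm.refl _) (List.Perm.append (List.Perm.refl _) (pvDesc_perm _))) ?_
  refine List.Perm.trans (List.Perm.append (List.Perm.refl _) h3) ?_
  exact List.filter_append_perm _ xs

lemma pvPartition_pairwise (xs : List Int) (p : Int) :
    (pvDesc (xs.filter (fun x => decide (p < x)))
      ++ List.replicate (xs.filter (fun x => decide (x = p))).length p
      ++ pvDesc (xs.filter (fun x => decide (x < p)))).Pairwise (fun a b => b ≤ a) := by
  rw [List.append_assoc, List.pairwise_append]
  refine ⟨pvDesc_pairwise _, ?_, ?_⟩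
  · rw [List.pairwise_append]
    refine ⟨List.pairwise_replicate.mpr (by simp), pvDesc_pairwise _, ?_⟩
    intro x hx y hy
    have hx' : x = p := List.eq_of_mem_replicate hx
    have hy' : y < p := by
      have := (pvDesc_perm _).mem_iff.mp hy
      simpa using List.of_mem_filter this
    omega
  · intro x hx y hy
    have hx' : p < x := by
      have := (pvDesc_perm _).mem_iff.mp hx
      simpa using List.of_mem_filter this
    rcases List.mem_append.mp hy with hy | hy
    · have : y = p := List.eq_of_mem_replicate hy
      omega
    · have : y < p := by
        have := (pvDesc_perm _).mem_iff.mp hy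
        simpa using List.of_mem_filter this
      omega

lemma pvDesc_sum (xs : List Int) : (pvDesc xs).sum = xs.sum :=
  (pvDesc_perm xs).sum_eq

-- MAIN LEMMA: the quickselect recursion computes the sum of the k largest
lemma pvTopkSum_eq (xs : List Int) (k : Int) :
    pvTopkSum xs k = ((pvDesc xs).take k.toNat).sum := by
  induction hL : xs.length using Nat.strong_induction_on generalizing xs k with
  | _ L ih =>
  match xs, hL with
  | [], _ => simp [pvTopkSum, pvDesc, PySem.List.sorted]
  | p :: rest, hL =>
    rw [pvTopkSum]
    set xs := p :: rest with hxs
    set hi := xs.filter (fun x => decide (p < x)) with hhi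
    set ne := (xs.filter (fun x => decide (x = p))).length with hne
    set lo := xs.filter (fun x => decide (x < p)) with hlo
    have hhiL : hi.length < L := by
      rw [← hL]
      exact List.length_filter_lt_length_iff_exists.mpr ⟨p, by simp [hxs]⟩
    have hloL : lo.length < L := by
      rw [← hL]
      exact List.length_filter_lt_length_iff_exists.mpr ⟨p, by simp [hxs]⟩
    have hdec : pvDesc xs = pvDesc hi ++ List.replicate ne p ++ pvDesc lo :=
      pvDesc_eq _ _ (pvPartition_perm xs p) (pvPartition_pairwise xs p)
    by_cases h0 : k ≤ 0
    · simp [h0, Int.toNat_of_nonpos h0]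
    · rw [if_neg h0]
      push_neg at h0
      by_cases h1 : k ≤ (hi.length : Int)
      · rw [if_pos h1, ih hi.length hhiL hi k rfl, hdec]
        rw [List.append_assoc, List.take_append_of_le_length]
        rw [pvDesc_length]; omega
      · rw [if_neg h1]
        push_neg at h1
        rw [hdec, List.append_assoc]
        rw [List.take_append]
        rw [pvDesc_length]
        have htake1 : (pvDesc hi).take k.toNat = pvDesc hi := by
          apply List.take_of_length_le
          rw [pvDesc_length]; omega
        rw [htake1, List.sum_append]
        by_cases h2 : k ≤ (hi.length : Int) + ne
        · rw [if_pos h2]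
          have htk : (List.replicate ne p ++ pvDesc lo).take (k.toNat - hi.length)
              = List.replicate (k.toNat - hi.length) p := by
            rw [List.take_append_of_le_length (by simp; omega)]
            rw [List.take_replicate]
            congr 1
            omega
          have hnat : (k.toNat - hi.length : Nat) = (k - (hi.length : Int)).toNat := by omega
          rw [htk, List.sum_replicate, hnat, nsmul_eq_mul,
            Int.toNat_of_nonneg (by omega : (0:Int) ≤ k - (hi.length : Int)), pvDesc_sum]
        · rw [if_neg h2]
          push_neg at h2
          rw [List.take_append, List.length_replicate,
            List.take_of_length_le (by simp; omega), List.sum_append, List.sum_replicate]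
          show hi.sum + (ne : Int) * p + pvTopkSum lo (k - (hi.length : Int) - (ne : Int)) = _
          rw [ih lo.length hloL lo (k - hi.length - ne) rfl]
          have hnat2 : (k.toNat - hi.length - ne : Nat) = (k - (hi.length : Int) - ne).toNat := by
            omega
          rw [← hnat2, nsmul_eq_mul, pvDesc_sum]
          ring

-- A's li equals B's diffs list
lemma pvLi_eq (n : Int) (a : List Int) (m : Int) :
    (PySem.List.pyRange 0 n 1).foldl (fun li i => li ++ [|PySem.List.pyGetD a i 0 - m|]) []
      = (PySem.List.pyRange 0 n 1).map (fun i => |PySem.List.pyGetD a i 0 - m|) := by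
  simpa using PySem.List.foldl_append_singleton_eq_map
    (fun i => |PySem.List.pyGetD a i 0 - m|) (PySem.List.pyRange 0 n 1) []

lemma pvDiffs_length (n : Int) (a : List Int) (m : Int) :
    ((PySem.List.pyRange 0 n 1).map (fun i => |PySem.List.pyGetD a i 0 - m|)).length = n.toNat := by
  simp [PySem.List.length_pyRange_one]

-- ===== VERDICT (by name: the statement is the Claim_ definition above) =====
theorem baitAndSwitch_spec : Claim_equal_baitAndSwitch := by
  intro n a k m _ hpre
  obtain ⟨_, hk⟩ := hpre
  unfold Spec_baitAndSwitch baitAndSwitch baitAndSwitch_alt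
  rw [pvLi_eq]
  set diffs := (PySem.List.pyRange 0 n 1).map (fun i => |PySem.List.pyGetD a i 0 - m|) with hd
  have hlen : (diffs.length : Int) = (n.toNat : Int) := by rw [pvDiffs_length]
  have hk' : k ≤ (diffs.length : Int) := by rw [hlen]; omega
  have hk2 : k ≤ (((PySem.List.sorted diffs (fun x => x) false).reverse).length : Int) := by
    rw [List.length_reverse, PySem.List.length_sorted]
    exact hk'
  rw [pvSumFirst _ k hk2, pvTopkSum_eq]
  rfl
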